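-- pv_equiv track=rewrite | github.com/mcraig567/AoC | 2021/Day_24/24-a.py | inc_serial
-- ===== SOURCE A (Python) =====
-- def inc_serial(serial, index):
-- 	new_val = int(serial[index]) + 1
--
-- 	# If a number passes 9, reset all values to the right of it to 1
-- 	if new_val == 10:
-- 		new_serial_list = [serial[:index]]
-- 		for i in range(index, len(serial)):
-- 			new_serial_list.append("1")
--
-- 		new_serial = "".join(new_serial_list)
-- 		return inc_serial(new_serial, index - 1)
--
-- 	# Otherwise return string with value increased by 1
-- 	return "".join([serial[:index], str(new_val), serial[index + 1:]])
-- ===== SOURCE B (Python) =====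
-- def inc_serial(serial, index):
--     # Iterative carry loop instead of tail recursion; builds the '1'-padding
--     # with string repetition instead of an append-and-join loop.
--     while True:
--         d = int(serial[index])
--         if d != 9:
--             return serial[:index] + str(d + 1) + serial[index + 1:]
--         serial = serial[:index] + '1' * (len(serial) - index)
--         index -= 1
-- ===== Notes on version B (the rewrite author's own statement) =====
-- stated objective: simpler
-- what changed: The tail-recursive carry chain becomes an explicit while-loop that rebuilds the padding with string repetition ('1' * k) instead of appending one '1' per range element into a list and joining it.
import Mathlib
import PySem

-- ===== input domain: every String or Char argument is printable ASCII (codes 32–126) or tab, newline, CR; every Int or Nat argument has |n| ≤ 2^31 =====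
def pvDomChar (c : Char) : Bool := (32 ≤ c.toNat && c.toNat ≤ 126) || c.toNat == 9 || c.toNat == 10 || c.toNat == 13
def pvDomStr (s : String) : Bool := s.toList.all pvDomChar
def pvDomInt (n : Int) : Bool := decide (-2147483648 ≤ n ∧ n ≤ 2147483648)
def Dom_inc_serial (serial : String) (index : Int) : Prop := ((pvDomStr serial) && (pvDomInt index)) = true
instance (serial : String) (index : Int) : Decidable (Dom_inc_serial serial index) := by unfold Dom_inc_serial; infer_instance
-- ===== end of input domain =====

-- B replaces A's tail-recursive carry chain by an explicit loop and builds the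
-- '1'-padding by repetition instead of an append-and-join list loop (objective: simpler).

-- ===== PORT A =====
-- A's recursion, totalised with fuel (the real recursion depth is ≤ |index| + 2).
def pvIncA : Nat → List Char → Int → List Char
  | 0, _, _ => []
  | fuel+1, serial, index =>
    match PySem.List.pyGet? serial index with
    | none => []                                   -- IndexError (outside Pre_)
    | some c =>
      match PySem.Int.ofChars? [c] with
      | none => []                                 -- ValueError (outside Pre_)
      | some v =>
        let new_val := v + 1
        if new_val = 10 then
          let new_serial_list :=
            (PySem.List.pyRange index (PySem.List.len serial) 1).foldl
              (fun acc _ => acc ++ [['1']]) [PySem.List.slice serial none (some index)]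
          pvIncA fuel (PySem.Chars.join [] new_serial_list) (index - 1)
        else
          PySem.Chars.join []
            [PySem.List.slice serial none (some index), PySem.Int.toChars new_val,
             PySem.List.slice serial (some (index + 1)) none]

def inc_serial (serial : String) (index : Int) : String :=
  String.ofList (pvIncA (index.natAbs + 2) serial.toList index)

-- ===== PORT B =====
-- B's while-loop, totalised with the same fuel bound.
def pvIncB : Nat → List Char → Int → List Char
  | 0, _, _ => []
  | fuel+1, serial, index =>
    match PySem.List.pyGet? serial index with
    | none => []                                   -- IndexError (outside Pre_)
    | some c =>
      match PySem.Int.ofChars? [c] with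
      | none => []                                 -- ValueError (outside Pre_)
      | some d =>
        if d ≠ 9 then
          PySem.List.slice serial none (some index) ++ PySem.Int.toChars (d + 1) ++
            PySem.List.slice serial (some (index + 1)) none
        else
          pvIncB fuel
            (PySem.List.slice serial none (some index) ++
              List.replicate (PySem.List.len serial - index).toNat '1')
            (index - 1)

def inc_serial_alt (serial : String) (index : Int) : String :=
  String.ofList (pvIncB (index.natAbs + 2) serial.toList index)

-- ===== PRECONDITION & SPEC =====
-- Pre_ = exactly the inputs where A returns: index in Python range, and every
-- character the carry chain actually reads (position index, and each position j
-- below it whose gap j+1..index is all '9'; for a negative index only that one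
-- position) is an ASCII digit.
def Pre_inc_serial (serial : String) (index : Int) : Prop :=
  -(serial.toList.length : Int) ≤ index ∧ index < (serial.toList.length : Int) ∧
  (if 0 ≤ index then
      ∀ j : Nat, j < index.toNat + 1 →
        (∀ m : Nat, m < index.toNat + 1 → j < m → serial.toList[m]! = '9') →
        (48 ≤ (serial.toList[j]!).toNat ∧ (serial.toList[j]!).toNat ≤ 57)
    else
      48 ≤ (serial.toList[((serial.toList.length : Int) + index).toNat]!).toNat ∧
      (serial.toList[((serial.toList.length : Int) + index).toNat]!).toNat ≤ 57)

instance (serial : String) (index : Int) : Decidable (Pre_inc_serial serial index) := by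
  unfold Pre_inc_serial; infer_instance

def pvWitness_inc_serial : String × Int := ("19", 1)

def Spec_inc_serial (serial : String) (index : Int) (out : String) : Prop := out = inc_serial_alt serial index
instance (serial : String) (index : Int) (out : String) : Decidable (Spec_inc_serial serial index out) := by unfold Spec_inc_serial; infer_instance

-- ===== CLAIM (what is proved, stated in full; the proofs are below) =====
def Claim_equal_inc_serial : Prop := ∀ (serial : String) (index : Int), Dom_inc_serial serial index → Pre_inc_serial serial index → Spec_inc_serial serial index (inc_serial serial index)

-- ===== LEMMAS AND PROOFS =====

-- joining an all-'1' singleton tail with the empty separator is appending '1's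
lemma pv_join_one_replicate (a : List Char) (m : Nat) :
    PySem.Chars.join [] (a :: List.replicate m ['1']) = a ++ List.replicate m '1' := by
  induction m generalizing a with
  | zero => simp [PySem.Chars.join_singleton]
  | succ m ih =>
      rw [List.replicate_succ, PySem.Chars.join_cons_cons, ih]
      simp [List.replicate_succ]

-- A's loop appends one constant element per range item
lemma pv_foldl_const (l : List Int) (acc : List (List Char)) :
    l.foldl (fun a _ => a ++ [['1']]) acc = acc ++ List.replicate l.length ['1'] := by
  induction l generalizing acc with
  | nil => simp
  | cons x l ih => simp [ih, List.replicate_succ]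

-- A's list-build-then-join equals B's slice-plus-replicate padding
lemma pv_rebuild_eq (serial : List Char) (index : Int) :
    PySem.Chars.join []
      ((PySem.List.pyRange index (PySem.List.len serial) 1).foldl
        (fun acc _ => acc ++ [['1']]) [PySem.List.slice serial none (some index)]) =
    PySem.List.slice serial none (some index) ++
      List.replicate (PySem.List.len serial - index).toNat '1' := by
  rw [pv_foldl_const, PySem.List.length_pyRange_one, List.singleton_append,
    pv_join_one_replicate]

lemma pv_incA_eq_incB (fuel : Nat) (serial : List Char) (index : Int) :
    pvIncA fuel serial index = pvIncB fuel serial index := by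
  induction fuel generalizing serial index with
  | zero => rfl
  | succ fuel ih =>
      rw [pvIncA, pvIncB]
      cases PySem.List.pyGet? serial index with
      | none => rfl
      | some c =>
        dsimp only
        cases PySem.Int.ofChars? [c] with
        | none => rfl
        | some v =>
          dsimp only
          by_cases hv : v = 9
          · subst hv
            rw [if_pos (by norm_num : (9 : Int) + 1 = 10),
              if_neg (by simp : ¬ (9 : Int) ≠ 9), pv_rebuild_eq, ih]
          · rw [if_neg (by omega), if_pos hv,
              PySem.Chars.join_cons_cons, PySem.Chars.join_cons_cons, PySem.Chars.join_singleton]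
            simp [List.append_assoc]

-- ===== VERDICT (by name: the statement is the Claim_ definition above) =====
theorem inc_serial_spec : Claim_equal_inc_serial := by
  intro serial index _ _
  unfold Spec_inc_serial inc_serial inc_serial_alt
  rw [pv_incA_eq_incB]
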